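-- pv_equiv track=rewrite | github.com/Alejandrot1/test_app | ai_builder.py | _naive_apply_diff
-- ===== SOURCE A (Python) =====
-- from typing import List, Dict, Optional, Tuple
--
-- def _naive_apply_diff(original_lines: List[str], diff_text: str) -> List[str]:
--     new_lines = [l for l in original_lines]
--     adds, removes = [], []
--     for line in diff_text.splitlines(True):
--         if line.startswith(('+++', '---', '@@')): continue
--         if line.startswith('+'): adds.append(line[1:])
--         elif line.startswith('-'): removes.append(line[1:])
--     for r in removes:
--         try:
--             idx = new_lines.index(r)
--             new_lines.pop(idx)
--         except ValueError:
--             pass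
--     insert_at = len(new_lines)
--     for a in adds:
--         new_lines.insert(insert_at, a); insert_at += 1
--     return new_lines
-- ===== SOURCE B (Python) =====
-- def _naive_apply_diff(original_lines, diff_text):
--     adds = []
--     counts = {}
--     for line in diff_text.splitlines(True):
--         if line.startswith(('+++', '---', '@@')):
--             continue
--         if line.startswith('+'):
--             adds.append(line[1:])
--         elif line.startswith('-'):
--             r = line[1:]
--             counts[r] = counts.get(r, 0) + 1
--     result = []
--     for l in original_lines:
--         c = counts.get(l, 0)
--         if c > 0:
--             counts[l] = c - 1
--         else:
--             result.append(l)
--     return result + adds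
-- ===== Notes on version B (the rewrite author's own statement) =====
-- stated objective: alternative
-- what changed: Replaces the per-removal list.index/pop scans over new_lines with a removal-count dictionary and one single-pass filter over original_lines that drops the first count occurrences of each value, then appends the adds.
import Mathlib
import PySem

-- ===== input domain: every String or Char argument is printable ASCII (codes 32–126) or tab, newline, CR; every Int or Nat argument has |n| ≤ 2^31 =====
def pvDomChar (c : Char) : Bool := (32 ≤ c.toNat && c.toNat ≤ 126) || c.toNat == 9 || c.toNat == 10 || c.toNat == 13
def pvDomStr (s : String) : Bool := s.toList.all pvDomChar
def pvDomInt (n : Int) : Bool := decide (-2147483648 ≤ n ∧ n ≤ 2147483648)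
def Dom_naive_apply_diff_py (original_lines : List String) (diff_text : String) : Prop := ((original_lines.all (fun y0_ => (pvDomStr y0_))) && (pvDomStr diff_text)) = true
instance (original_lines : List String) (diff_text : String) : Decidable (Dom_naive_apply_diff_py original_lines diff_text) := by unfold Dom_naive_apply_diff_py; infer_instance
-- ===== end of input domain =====

-- B replaces A's per-removal index/pop scans with a removal-count dict and one single filter pass (objective: alternative).
-- A mutates only its local copy of original_lines; neither version mutates the caller's arguments.

-- shared library helper: diff_text.splitlines(True) (keepends). Hand-ported: exact on the stated domain,
-- whose only line-break characters are '\n', '\r' and the pair '\r\n'.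
def pySplitKeep : List Char → List Char → List String
  | [], acc => if acc.isEmpty then [] else [String.ofList acc.reverse]
  | '\r' :: '\n' :: rest, acc => String.ofList (acc.reverse ++ ['\r', '\n']) :: pySplitKeep rest []
  | '\n' :: rest, acc => String.ofList (acc.reverse ++ ['\n']) :: pySplitKeep rest []
  | '\r' :: rest, acc => String.ofList (acc.reverse ++ ['\r']) :: pySplitKeep rest []
  | c :: rest, acc => pySplitKeep rest (c :: acc)
termination_by cs _ => cs.length

-- ===== PORT A =====
-- one iteration of A's parse loop (adds, removes are the two accumulator lists)
def pvStepAParse (ar : List String × List String) (line : String) : List String × List String :=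
  if PySem.Str.startswith line "+++" || PySem.Str.startswith line "---" || PySem.Str.startswith line "@@" then ar
  else if PySem.Str.startswith line "+" then (ar.1 ++ [PySem.Str.slice line (some 1) none], ar.2)
  else if PySem.Str.startswith line "-" then (ar.1, ar.2 ++ [PySem.Str.slice line (some 1) none])
  else ar

-- one iteration of A's removal loop: idx = new_lines.index(r); new_lines.pop(idx); except ValueError: pass
def pvRemoveStep (nl : List String) (r : String) : List String :=
  match PySem.List.index? nl r with
  | some idx =>
    match PySem.List.pop? nl (idx : Int) with
    | some p => p.2
    | none => nl
  | none => nl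

def naive_apply_diff_py (original_lines : List String) (diff_text : String) : List String :=
  let new_lines := original_lines.map (fun l => l)
  let ar := (pySplitKeep diff_text.toList []).foldl pvStepAParse ([], [])
  let adds := ar.1
  let removes := ar.2
  let new_lines := removes.foldl pvRemoveStep new_lines
  let st := adds.foldl (fun (st : List String × Int) a =>
      (PySem.List.insert st.1 st.2 a, st.2 + 1)) (new_lines, (new_lines.length : Int))
  st.1

-- ===== PORT B =====
-- one iteration of B's parse loop (adds list, counts dict)
def pvStepBParse (ac : List String × PySem.Dict String Int) (line : String) : List String × PySem.Dict String Int :=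
  if PySem.Str.startswith line "+++" || PySem.Str.startswith line "---" || PySem.Str.startswith line "@@" then ac
  else if PySem.Str.startswith line "+" then (ac.1 ++ [PySem.Str.slice line (some 1) none], ac.2)
  else if PySem.Str.startswith line "-" then
    let r := PySem.Str.slice line (some 1) none
    (ac.1, ac.2.insert r (ac.2.getD r 0 + 1))
  else ac

-- one iteration of B's filter loop (counts dict, result list)
def pvStepBFilter (st : PySem.Dict String Int × List String) (l : String) : PySem.Dict String Int × List String :=
  let c := st.1.getD l 0
  if c > 0 then (st.1.insert l (c - 1), st.2) else (st.1, st.2 ++ [l])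

def naive_apply_diff_py_alt (original_lines : List String) (diff_text : String) : List String :=
  let ac := (pySplitKeep diff_text.toList []).foldl pvStepBParse ([], PySem.Dict.empty)
  let adds := ac.1
  let counts := ac.2
  let st := original_lines.foldl pvStepBFilter (counts, [])
  st.2 ++ adds

-- ===== PRECONDITION & SPEC =====
def Spec_naive_apply_diff_py (original_lines : List String) (diff_text : String) (out : List String) : Prop := out = naive_apply_diff_py_alt original_lines diff_text
instance (original_lines : List String) (diff_text : String) (out : List String) : Decidable (Spec_naive_apply_diff_py original_lines diff_text out) := by unfold Spec_naive_apply_diff_py; infer_instance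

-- ===== CLAIM (what is proved, stated in full; the proofs are below) =====
def Claim_equal_naive_apply_diff_py : Prop := ∀ (original_lines : List String) (diff_text : String), Dom_naive_apply_diff_py original_lines diff_text → Spec_naive_apply_diff_py original_lines diff_text (naive_apply_diff_py original_lines diff_text)

-- ===== LEMMAS AND PROOFS =====

-- functional-counter view of B's filter pass (proof device only)
def pvFF : List String → (String → Int) → List String
  | [], _ => []
  | x :: xs, f => if f x > 0 then pvFF xs (fun k => if k = x then f x - 1 else f k) else x :: pvFF xs f

lemma pvFF_zero (nl : List String) : pvFF nl (fun _ => 0) = nl := by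
  induction nl with
  | nil => rfl
  | cons x xs ih => simp [pvFF, ih]

lemma bfilter_eq (lines : List String) (d : PySem.Dict String Int) (acc : List String) :
    (lines.foldl pvStepBFilter (d, acc)).2 = acc ++ pvFF lines (fun k => d.getD k 0) := by
  induction lines generalizing d acc with
  | nil => simp [pvFF]
  | cons x xs ih =>
    simp only [List.foldl_cons, pvStepBFilter, pvFF]
    by_cases h : d.getD x 0 > 0
    · simp only [h, if_pos]
      rw [ih]
      have hf : (fun k => (d.insert x (d.getD x 0 - 1)).getD k 0)
          = (fun k => if k = x then d.getD x 0 - 1 else d.getD k 0) := by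
        funext k; rw [PySem.Dict.getD_insert]
      rw [hf]
    · simp only [h, if_neg, not_false_iff]
      rw [ih, List.append_assoc]
      rfl

lemma pvEraseIdxAt (pre suf : List String) (r : String) :
    (pre ++ r :: suf).eraseIdx pre.length = pre ++ suf := by
  induction pre with
  | nil => rfl
  | cons p ps ih => simpa [List.eraseIdx] using ih

lemma removeStep_eq_erase (nl : List String) (r : String) : pvRemoveStep nl r = nl.erase r := by
  unfold pvRemoveStep
  cases h : PySem.List.index? nl r with
  | none =>
    rw [List.erase_of_not_mem]
    exact (PySem.List.index?_eq_none_iff nl r).mp h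
  | some idx =>
    obtain ⟨hk, _hv, _⟩ := PySem.List.getElem_of_index?_eq_some h
    obtain ⟨pre, suf, rfl, rfl, hnp⟩ := (PySem.List.index?_eq_some_iff nl r idx).mp h
    simp only [PySem.List.pop?_natCast _ _ hk]
    rw [pvEraseIdxAt, List.erase_append_right (r :: suf) hnp, List.erase_cons_head]

lemma pvFF_incr (nl : List String) (f : String → Int) (r : String) (hf : ∀ k, 0 ≤ f k) :
    pvFF nl (fun k => if k = r then f k + 1 else f k) = pvFF (nl.erase r) f := by
  induction nl generalizing f with
  | nil => rfl
  | cons x xs ih =>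
    by_cases hxr : x = r
    · subst hxr
      rw [List.erase_cons_head]
      have hpos : (0:Int) < f x + 1 := by have := hf x; omega
      simp only [pvFF, hpos, if_pos]
      have hfe : (fun k => if k = x then f x + 1 - 1 else if k = x then f k + 1 else f k) = f := by
        funext k
        by_cases hk : k = x
        · subst hk; simp
        · simp [hk]
      rw [hfe]
    · rw [List.erase_cons_tail (by simp [hxr])]
      simp only [pvFF, if_neg hxr]
      by_cases hx : f x > 0
      · simp only [hx, if_pos]
        have heq : (fun k => if k = x then f x - 1 else if k = r then f k + 1 else f k)
            = (fun k => if k = r then (if k = x then f x - 1 else f k) + 1 else (if k = x then f x - 1 else f k)) := by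
          funext k
          by_cases hk : k = x <;> by_cases hk' : k = r <;> simp_all
        rw [heq]
        exact ih (fun k => if k = x then f x - 1 else f k) (by
          intro k
          by_cases hk : k = x
          · simp only [hk, if_pos]; omega
          · simp only [hk, if_neg, not_false_iff]; exact hf k)
      · simp only [hx, if_neg, not_false_iff]
        rw [ih f hf]

lemma erase_fold_eq_pvFF (removes nl : List String) :
    removes.foldl (fun nl r => nl.erase r) nl = pvFF nl (fun k => (removes.count k : Int)) := by
  induction removes generalizing nl with
  | nil => simp [pvFF_zero]
  | cons r rs ih =>
    simp only [List.foldl_cons]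
    rw [ih]
    have heq : (fun k => (((r :: rs).count k : Nat) : Int)) = (fun k => if k = r then ((rs.count k : Nat) : Int) + 1 else ((rs.count k : Nat) : Int)) := by
      funext k
      by_cases hk : k = r
      · subst hk; simp
      · have hrk : ¬r = k := fun e => hk e.symm
        simp [hk, hrk]
    rw [heq, pvFF_incr _ _ _ (by intro k; positivity)]

lemma parse_rel (lines : List String) (adds removes : List String) (d : PySem.Dict String Int)
    (h : ∀ k, d.getD k 0 = (removes.count k : Int)) :
    (lines.foldl pvStepBParse (adds, d)).1 = (lines.foldl pvStepAParse (adds, removes)).1 ∧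
    ∀ k, (lines.foldl pvStepBParse (adds, d)).2.getD k 0 = ((lines.foldl pvStepAParse (adds, removes)).2.count k : Int) := by
  induction lines generalizing adds removes d with
  | nil => exact ⟨rfl, h⟩
  | cons line rest ih =>
    simp only [List.foldl_cons, pvStepAParse, pvStepBParse]
    by_cases h1 : (PySem.Str.startswith line "+++" || PySem.Str.startswith line "---" || PySem.Str.startswith line "@@") = true
    · simp only [h1, if_pos]; exact ih adds removes d h
    · simp only [h1, if_neg, Bool.not_eq_true]
      by_cases h2 : PySem.Str.startswith line "+" = true
      · simp only [h2, if_pos]; exact ih _ removes d h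
      · simp only [h2, if_neg, Bool.not_eq_true]
        by_cases h3 : PySem.Str.startswith line "-" = true
        · simp only [h3, if_pos]
          apply ih
          intro k
          rw [PySem.Dict.getD_insert]
          by_cases hk : k = PySem.Str.slice line (some 1) none
          · simp [hk, h, List.count_append]
          · simp [hk, h, List.count_append, Ne.symm hk]
        · simp only [h3]; exact ih adds removes d h

lemma insert_at_length (nl : List String) (a : String) :
    PySem.List.insert nl (nl.length : Int) a = nl ++ [a] := by
  rw [PySem.List.insert_natCast nl nl.length a (le_refl _)]; simp

lemma insert_fold (adds : List String) (nl : List String) :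
    (adds.foldl (fun (st : List String × Int) a =>
      (PySem.List.insert st.1 st.2 a, st.2 + 1)) (nl, (nl.length : Int))).1 = nl ++ adds := by
  induction adds generalizing nl with
  | nil => simp
  | cons a rest ih =>
    simp only [List.foldl_cons, insert_at_length]
    have : ((nl.length : Int) + 1) = (((nl ++ [a]).length : Nat) : Int) := by simp
    rw [this, ih (nl ++ [a]), List.append_assoc]
    rfl

-- ===== VERDICT (by name: the statement is the Claim_ definition above) =====
theorem naive_apply_diff_py_spec : Claim_equal_naive_apply_diff_py := by
  intro original_lines diff_text _
  unfold Spec_naive_apply_diff_py naive_apply_diff_py naive_apply_diff_py_alt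
  simp only [List.map_id']
  obtain ⟨h1, h2⟩ := parse_rel (pySplitKeep diff_text.toList []) [] [] PySem.Dict.empty
    (by intro k; simp [PySem.Dict.getD, PySem.Dict.get?, PySem.Dict.empty])
  rw [insert_fold, bfilter_eq, h1]
  congr 1
  have hstep : pvRemoveStep = (fun nl r => nl.erase r) := by
    funext nl r; exact removeStep_eq_erase nl r
  rw [hstep, erase_fold_eq_pvFF]
  congr 1
  funext k
  rw [h2 k]
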